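-- pv_equiv track=rewrite | github.com/jacobo97pd/TracePath | tool/rebuild_linkedin_from_images.py | _clue_map_from_tuples
-- ===== SOURCE A (Python) =====
-- from typing import Any, Dict, List, Optional, Sequence, Tuple
--
-- def _clue_map_from_tuples(tuples: Sequence[Tuple[int, int, int]], expected: Sequence[int]) -> Dict[int, Tuple[int, int]]:
--     keep = set(int(v) for v in expected)
--     out: Dict[int, Tuple[int, int]] = {}
--     for n, x, y in tuples:
--         ni = int(n)
--         if ni in keep and ni not in out:
--             out[ni] = (int(x), int(y))
--     return out
-- ===== SOURCE B (Python) =====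
-- def _clue_map_from_tuples(tuples, expected):
--     firsts = [int(n) for n, _, _ in tuples]
--     found = []
--     for k in dict.fromkeys(int(v) for v in expected):
--         if k in firsts:
--             found.append((firsts.index(k), k))
--     found.sort(key=lambda p: p[0])
--     return {k: (int(tuples[i][1]), int(tuples[i][2])) for i, k in found}
-- ===== Notes on version B (the rewrite author's own statement) =====
-- stated objective: alternative
-- what changed: Instead of A's single guarded pass over the tuples with a growing dict, B scans per key: for each distinct expected key it looks up the first index of that key among the tuples' first components, sorts the (index, key) hits by index, and builds the result from those indices.
import Mathlib
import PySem

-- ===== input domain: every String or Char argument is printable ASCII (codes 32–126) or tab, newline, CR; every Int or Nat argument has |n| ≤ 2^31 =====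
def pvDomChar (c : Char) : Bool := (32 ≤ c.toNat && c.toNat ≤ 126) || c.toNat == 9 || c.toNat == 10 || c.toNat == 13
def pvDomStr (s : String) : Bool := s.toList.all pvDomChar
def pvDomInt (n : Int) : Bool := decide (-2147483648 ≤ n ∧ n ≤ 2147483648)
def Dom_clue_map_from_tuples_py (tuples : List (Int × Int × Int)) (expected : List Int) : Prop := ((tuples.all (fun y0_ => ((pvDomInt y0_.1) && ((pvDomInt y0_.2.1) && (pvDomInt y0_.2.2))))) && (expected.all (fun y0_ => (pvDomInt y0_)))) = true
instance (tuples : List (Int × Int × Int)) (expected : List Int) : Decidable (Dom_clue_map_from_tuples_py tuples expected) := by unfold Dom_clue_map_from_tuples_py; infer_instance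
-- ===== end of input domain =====

-- B replaces A's single guarded pass with a per-key search: for each distinct expected key it
-- finds the first index of that key among the tuples' first components, sorts the hits by index,
-- and builds the result from those indices (objective: alternative; not faster).

-- ===== PORT A =====
def clue_map_from_tuples_py (tuples : List (Int × Int × Int)) (expected : List Int) : List (Int × Int × Int) :=
  let keep : PySem.Set Int := PySem.Set.ofList expected
  let out : PySem.Dict Int (Int × Int) :=
    tuples.foldl (fun out t =>
      let ni := t.1
      if keep.contains ni && !(out.contains ni) then out.insert ni (t.2.1, t.2.2) else out)
      PySem.Dict.empty
  out.items

-- ===== PORT B =====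
def clue_map_from_tuples_py_alt (tuples : List (Int × Int × Int)) (expected : List Int) : List (Int × Int × Int) :=
  let firsts : List Int := tuples.map (fun t => t.1)
  -- for k in dict.fromkeys(...): if k in firsts: found.append((firsts.index(k), k))
  let found : List (Nat × Int) :=
    (PySem.List.dedup expected).foldl (fun acc k =>
      match PySem.List.index? firsts k with
      | some i => acc ++ [(i, k)]
      | none => acc) []
  -- found.sort(key=lambda p: p[0])
  let sf := PySem.List.sorted found (fun p => p.1) false
  -- {k: (int(tuples[i][1]), int(tuples[i][2])) for i, k in found}
  (sf.foldl (fun (d : PySem.Dict Int (Int × Int)) p =>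
      d.insert p.2 ((PySem.List.pyGetD tuples (p.1 : Int) (0, 0, 0)).2.1,
                    (PySem.List.pyGetD tuples (p.1 : Int) (0, 0, 0)).2.2))
    PySem.Dict.empty).items

-- ===== PRECONDITION & SPEC =====
def Spec_clue_map_from_tuples_py (tuples : List (Int × Int × Int)) (expected : List Int) (out : List (Int × Int × Int)) : Prop := out = clue_map_from_tuples_py_alt tuples expected
instance (tuples : List (Int × Int × Int)) (expected : List Int) (out : List (Int × Int × Int)) : Decidable (Spec_clue_map_from_tuples_py tuples expected out) := by unfold Spec_clue_map_from_tuples_py; infer_instance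

-- ===== CLAIM (what is proved, stated in full; the proofs are below) =====
def Claim_equal_clue_map_from_tuples_py : Prop := ∀ (tuples : List (Int × Int × Int)) (expected : List Int), Dom_clue_map_from_tuples_py tuples expected → Spec_clue_map_from_tuples_py tuples expected (clue_map_from_tuples_py tuples expected)

-- ===== LEMMAS AND PROOFS =====

-- canonical description of the result: first occurrence of each still-wanted key, in tuple order
def pvSpec : List (Int × Int × Int) → List Int → List (Int × Int × Int)
  | [], _ => []
  | t :: ts, ks =>
    if t.1 ∈ ks then (t.1, t.2.1, t.2.2) :: pvSpec ts (ks.filter (fun k => k ≠ t.1))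
    else pvSpec ts ks

-- the same with the index of the emitting tuple
def pvOcc : List (Int × Int × Int) → List Int → Nat → List (Nat × Int)
  | [], _, _ => []
  | t :: ts, ks, i =>
    if t.1 ∈ ks then (i, t.1) :: pvOcc ts (ks.filter (fun k => k ≠ t.1)) (i + 1)
    else pvOcc ts ks (i + 1)

-- A's loop invariant: the items grow by exactly the first occurrences of the still-missing keys
theorem pvA_items (keep : PySem.Set Int) :
    ∀ (ts : List (Int × Int × Int)) (out : PySem.Dict Int (Int × Int)) (ks : List Int),
      (∀ k, k ∈ ks ↔ (keep.contains k = true ∧ out.contains k = false)) →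
      (ts.foldl (fun out t =>
        if keep.contains t.1 && !(out.contains t.1) then out.insert t.1 (t.2.1, t.2.2) else out)
        out).items = out.items ++ pvSpec ts ks := by
  intro ts
  induction ts with
  | nil => intro out ks _; simp [pvSpec]
  | cons t rest ih =>
    intro out ks h
    by_cases hm : t.1 ∈ ks
    · obtain ⟨hk, ho⟩ := (h t.1).mp hm
      rw [List.foldl_cons, if_pos (by rw [hk, ho]; rfl), pvSpec, if_pos hm,
        ih _ (ks.filter (fun k => k ≠ t.1)) ?_, PySem.Dict.items_insert_of_not_contains _ _ ho]
      · simp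
      · intro k
        simp only [List.mem_filter, h k, PySem.Dict.contains_insert, decide_eq_true_eq,
          Bool.or_eq_false_iff, beq_eq_false_iff_ne]
        tauto
    · have hcond : ¬ (keep.contains t.1 && !(out.contains t.1)) = true := by
        intro hc
        simp only [Bool.and_eq_true, Bool.not_eq_true'] at hc
        exact hm ((h t.1).mpr ⟨hc.1, hc.2⟩)
      rw [List.foldl_cons, if_neg hcond, pvSpec, if_neg hm]
      exact ih out ks h

-- B's collecting loop is a filterMap over the candidate keys
theorem pv_found_eq (firsts : List Int) :
    ∀ (ks : List Int) (acc : List (Nat × Int)),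
      ks.foldl (fun acc k =>
        match PySem.List.index? firsts k with
        | some i => acc ++ [(i, k)]
        | none => acc) acc
      = acc ++ ks.filterMap (fun k => (PySem.List.index? firsts k).map (fun i => (i, k))) := by
  intro ks
  induction ks with
  | nil => intro acc; simp
  | cons k rest ih =>
    intro acc
    rw [List.foldl_cons, List.filterMap_cons]
    cases hidx : PySem.List.index? firsts k
    · simp only [ih, Option.map_none]
    · simp only [ih, Option.map_some, List.append_assoc, List.singleton_append]

-- the hits collected per key are a permutation of the index-ordered occurrences
theorem pv_occ_perm :
    ∀ (ts : List (Int × Int × Int)) (ks : List Int) (i : Nat), ks.Nodup →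
      (ks.filterMap (fun k =>
        (PySem.List.index? (ts.map (fun t => t.1)) k).map (fun j => (i + j, k)))).Perm
        (pvOcc ts ks i) := by
  intro ts
  induction ts with
  | nil =>
    intro ks i _
    simp [pvOcc, PySem.List.index?]
  | cons t rest ih =>
    intro ks i hnd
    simp only [List.map_cons]
    by_cases hm : t.1 ∈ ks
    · rw [pvOcc, if_pos hm]
      have hperm : ks.Perm (t.1 :: ks.filter (fun k => k ≠ t.1)) := by
        have := List.perm_cons_erase hm
        rwa [hnd.erase_eq_filter t.1, show (fun x => x != t.1) = (fun k => decide (k ≠ t.1)) by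
          funext x; by_cases h : x = t.1 <;> simp [h]] at this
      refine ((hperm.filterMap _).trans ?_)
      rw [List.filterMap_cons]
      simp only [PySem.List.index?_cons_self, Option.map_some, Nat.add_zero]
      refine List.Perm.cons _ ?_
      have heq : List.filterMap
          (fun k => Option.map (fun j => (i + j, k)) (PySem.List.index? (t.1 :: List.map (fun t => t.1) rest) k))
          (ks.filter (fun k => k ≠ t.1))
          = List.filterMap
          (fun k => Option.map (fun j => (i + 1 + j, k)) (PySem.List.index? (List.map (fun t => t.1) rest) k))
          (ks.filter (fun k => k ≠ t.1)) := by
        apply List.filterMap_congr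
        intro k hk
        have hne : t.1 ≠ k := by
          rcases List.mem_filter.mp hk with ⟨-, hne⟩
          simpa [eq_comm] using of_decide_eq_true hne
        rw [PySem.List.index?_cons_of_ne _ hne, Option.map_map]
        congr 1
        funext j
        simp; omega
      rw [heq]
      exact ih (ks.filter (fun k => k ≠ t.1)) (i + 1) (hnd.filter _)
    · rw [pvOcc, if_neg hm]
      have heq : List.filterMap
          (fun k => Option.map (fun j => (i + j, k)) (PySem.List.index? (t.1 :: List.map (fun t => t.1) rest) k)) ks
          = List.filterMap
          (fun k => Option.map (fun j => (i + 1 + j, k)) (PySem.List.index? (List.map (fun t => t.1) rest) k)) ks := by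
        apply List.filterMap_congr
        intro k hk
        have hne : t.1 ≠ k := fun he => hm (he ▸ hk)
        rw [PySem.List.index?_cons_of_ne _ hne, Option.map_map]
        congr 1
        funext j
        simp; omega
      rw [heq]
      exact ih ks (i + 1) hnd

-- indices emitted by pvOcc are at least the running index
theorem pv_occ_fst_ge :
    ∀ (ts : List (Int × Int × Int)) (ks : List Int) (i : Nat) (p : Nat × Int),
      p ∈ pvOcc ts ks i → i ≤ p.1 := by
  intro ts
  induction ts with
  | nil => intro ks i p hp; simp [pvOcc] at hp
  | cons t rest ih =>
    intro ks i p hp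
    rw [pvOcc] at hp
    split at hp
    · rcases List.mem_cons.mp hp with h | h
      · simp [h]
      · exact le_of_lt (Nat.lt_of_lt_of_le (Nat.lt_succ_self i) (ih _ _ _ h))
    · exact le_of_lt (Nat.lt_of_lt_of_le (Nat.lt_succ_self i) (ih _ _ _ hp))

-- so pvOcc is strictly increasing in the index component
theorem pv_occ_pairwise :
    ∀ (ts : List (Int × Int × Int)) (ks : List Int) (i : Nat),
      (pvOcc ts ks i).Pairwise (fun a b => a.1 < b.1) := by
  intro ts
  induction ts with
  | nil => intro ks i; simp [pvOcc]
  | cons t rest ih =>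
    intro ks i
    rw [pvOcc]
    split
    · exact List.Pairwise.cons
        (fun p hp => Nat.lt_of_lt_of_le (Nat.lt_succ_self i) (pv_occ_fst_ge _ _ _ _ hp)) (ih _ _)
    · exact ih _ _

-- every emitted key was still wanted
theorem pv_occ_mem_ks :
    ∀ (ts : List (Int × Int × Int)) (ks : List Int) (i : Nat) (p : Nat × Int),
      p ∈ pvOcc ts ks i → p.2 ∈ ks := by
  intro ts
  induction ts with
  | nil => intro ks i p hp; simp [pvOcc] at hp
  | cons t rest ih =>
    intro ks i p hp
    rw [pvOcc] at hp
    split at hp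
    · rcases List.mem_cons.mp hp with h | h
      · simp [h]; assumption
      · exact List.mem_of_mem_filter (ih _ _ _ h)
    · exact ih _ _ _ hp

-- the emitted keys are distinct
theorem pv_occ_keys_nodup :
    ∀ (ts : List (Int × Int × Int)) (ks : List Int) (i : Nat),
      ((pvOcc ts ks i).map (fun p => p.2)).Nodup := by
  intro ts
  induction ts with
  | nil => intro ks i; simp [pvOcc]
  | cons t rest ih =>
    intro ks i
    rw [pvOcc]
    split
    · rw [List.map_cons]
      refine List.Pairwise.cons ?_ (ih _ _)
      intro b hb he
      rcases List.mem_map.mp hb with ⟨p, hp, hpb⟩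
      have := pv_occ_mem_ks _ _ _ _ hp
      rw [List.mem_filter] at this
      exact (of_decide_eq_true this.2) (by rw [hpb]; exact he.symm)
    · exact ih _ _

-- reading each occurrence back through its index reproduces pvSpec
theorem pv_occ_map_spec (TS : List (Int × Int × Int)) :
    ∀ (ts : List (Int × Int × Int)) (pre : List (Int × Int × Int)) (ks : List Int),
      TS = pre ++ ts →
      (pvOcc ts ks pre.length).map (fun p =>
        (p.2, (PySem.List.pyGetD TS ((p.1 : Nat) : Int) (0, 0, 0)).2.1,
              (PySem.List.pyGetD TS ((p.1 : Nat) : Int) (0, 0, 0)).2.2))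
      = pvSpec ts ks := by
  intro ts
  induction ts with
  | nil => intro pre ks _; simp [pvOcc, pvSpec]
  | cons t rest ih =>
    intro pre ks hTS
    have hrec : ∀ ks', (pvOcc rest ks' (pre.length + 1)).map (fun p =>
        (p.2, (PySem.List.pyGetD TS ((p.1 : Nat) : Int) (0, 0, 0)).2.1,
              (PySem.List.pyGetD TS ((p.1 : Nat) : Int) (0, 0, 0)).2.2))
        = pvSpec rest ks' := by
      intro ks'
      have := ih (pre ++ [t]) ks' (by simp [hTS])
      simpa using this
    by_cases hm : t.1 ∈ ks
    · rw [pvOcc, pvSpec, if_pos hm, if_pos hm, List.map_cons, hrec]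
      have hget : PySem.List.pyGetD TS ((pre.length : Nat) : Int) (0, 0, 0) = t := by
        rw [PySem.List.pyGetD_natCast, hTS]
        rw [List.getD_eq_getElem _ _ (by simp)]
        simp
      simp [hget]
    · rw [pvOcc, pvSpec, if_neg hm, if_neg hm, hrec]

-- membership characterisation used to start A's invariant
theorem pv_dedup_start (expected : List Int) (k : Int) :
    k ∈ PySem.List.dedup expected ↔
      ((PySem.Set.ofList expected).contains k = true ∧
        (PySem.Dict.empty : PySem.Dict Int (Int × Int)).contains k = false) := by
  rw [PySem.List.dedup_eq_ofList]
  simp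

-- ===== VERDICT (by name: the statement is the Claim_ definition above) =====
theorem clue_map_from_tuples_py_spec : Claim_equal_clue_map_from_tuples_py := by
  intro tuples expected _
  unfold Spec_clue_map_from_tuples_py clue_map_from_tuples_py clue_map_from_tuples_py_alt
  simp only []
  -- A's side
  rw [pvA_items (PySem.Set.ofList expected) tuples PySem.Dict.empty (PySem.List.dedup expected)
    (pv_dedup_start expected)]
  -- B's side
  rw [pv_found_eq, List.nil_append]
  have hperm := pv_occ_perm tuples (PySem.List.dedup expected) 0
    (PySem.List.nodup_dedup expected)
  have hperm' : ((PySem.List.dedup expected).filterMap (fun k =>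
      (PySem.List.index? (tuples.map (fun t => t.1)) k).map (fun i => (i, k)))).Perm
      (pvOcc tuples (PySem.List.dedup expected) 0) := by
    refine List.Perm.trans (List.Perm.of_eq (List.filterMap_congr ?_)) hperm
    intro k _
    congr 1
    funext j
    simp
  rw [PySem.List.sorted_eq_of_perm_of_pairwise_lt _ _ _ hperm'.symm
    (pv_occ_pairwise tuples (PySem.List.dedup expected) 0)]
  have hrew := PySem.Dict.items_foldl_insert_fresh
    (pvOcc tuples (PySem.List.dedup expected) 0) (fun p => p.2)
    (fun p => ((PySem.List.pyGetD tuples ((p.1 : Nat) : Int) (0, 0, 0)).2.1,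
               (PySem.List.pyGetD tuples ((p.1 : Nat) : Int) (0, 0, 0)).2.2))
    PySem.Dict.empty (by intro a _; simp) (pv_occ_keys_nodup tuples _ 0)
  rw [hrew]
  simpa using (pv_occ_map_spec tuples tuples [] (PySem.List.dedup expected) rfl).symm
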